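-- pv_equiv track=rewrite | github.com/manb220540/Caro-Website-NLCS | caro_app.py | evaluate
-- ===== SOURCE A (Python) =====
-- HUMAN = 'X'
--
-- AI = 'O'
--
-- def evaluate_line(line, WINNING_COUNT):
--     count_ai = line.count(AI)
--     count_human = line.count(HUMAN)
--     if count_ai == WINNING_COUNT:
--         return 100
--     if count_human == WINNING_COUNT:
--         return -100
--     return 0
--
-- def evaluate(board_data, min_row, max_row, min_col, max_col, BOARD_SIZE, WINNING_COUNT):
--     """Tính điểm cục bộ."""
--     score = 0
--     min_row = max(0, min_row)
--     max_row = min(BOARD_SIZE - 1, max_row)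
--     min_col = max(0, min_col)
--     max_col = min(BOARD_SIZE - 1, max_col)
--
--     # Kiểm tra hàng
--     for i in range(min_row, max_row + 1):
--         for j in range(min_col, max_col - WINNING_COUNT + 2):
--             line = board_data[i][j:j + WINNING_COUNT]
--             score += evaluate_line(line, WINNING_COUNT)
--
--     # Kiểm tra cột
--     for j in range(min_col, max_col + 1):
--         for i in range(min_row, max_row - WINNING_COUNT + 2):
--             col_slice = [board_data[i + k][j] for k in range(WINNING_COUNT)]
--             score += evaluate_line(col_slice, WINNING_COUNT)
--
--     # Kiểm tra đường chéo
--     for i in range(min_row, max_row - WINNING_COUNT + 2):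
--         for j in range(min_col, max_col - WINNING_COUNT + 2):
--             diag1 = [board_data[i + k][j + k] for k in range(WINNING_COUNT)]
--             diag2 = [board_data[i + k][j + (WINNING_COUNT - 1 - k)] for k in range(WINNING_COUNT)]
--             score += evaluate_line(diag1, WINNING_COUNT)
--             score += evaluate_line(diag2, WINNING_COUNT)
--
--     return score
-- ===== SOURCE B (Python) =====
-- HUMAN = 'X'
--
-- AI = 'O'
--
-- def _run_table(board_data, sym, di, dj):
--     """run_table[i][j] = number of consecutive cells equal to sym ending at (i, j)
--     along direction (di, dj) (looking backwards); 0 if board_data[i][j] != sym."""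
--     tab = []
--     for i in range(len(board_data)):
--         row = board_data[i]
--         cur = []
--         for j in range(len(row)):
--             v = 0
--             if row[j] == sym:
--                 pi = i - di
--                 pj = j - dj
--                 if pi == i:
--                     prow = cur
--                 elif 0 <= pi < len(tab):
--                     prow = tab[pi]
--                 else:
--                     prow = None
--                 prev = prow[pj] if (prow is not None and 0 <= pj < len(prow)) else 0
--                 v = prev + 1
--             cur.append(v)
--         tab.append(cur)
--     return tab
--
-- def evaluate(board_data, min_row, max_row, min_col, max_col, BOARD_SIZE, WINNING_COUNT):
--     """Tính điểm cục bộ (same totals, via precomputed run-length tables)."""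
--     if WINNING_COUNT <= 0:
--         return 0
--     W = WINNING_COUNT
--     min_row = max(0, min_row)
--     max_row = min(BOARD_SIZE - 1, max_row)
--     min_col = max(0, min_col)
--     max_col = min(BOARD_SIZE - 1, max_col)
--
--     row_o = _run_table(board_data, AI, 0, 1)
--     row_h = _run_table(board_data, HUMAN, 0, 1)
--     col_o = _run_table(board_data, AI, 1, 0)
--     col_h = _run_table(board_data, HUMAN, 1, 0)
--     dia_o = _run_table(board_data, AI, 1, 1)
--     dia_h = _run_table(board_data, HUMAN, 1, 1)
--     ant_o = _run_table(board_data, AI, 1, -1)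
--     ant_h = _run_table(board_data, HUMAN, 1, -1)
--
--     score = 0
--
--     # rows: window ends at (i, j + W - 1)
--     for i in range(min_row, max_row + 1):
--         for j in range(min_col, max_col - W + 2):
--             if row_o[i][j + W - 1] >= W:
--                 score += 100
--             elif row_h[i][j + W - 1] >= W:
--                 score -= 100
--
--     # columns: window ends at (i + W - 1, j)
--     for j in range(min_col, max_col + 1):
--         for i in range(min_row, max_row - W + 2):
--             if col_o[i + W - 1][j] >= W:
--                 score += 100
--             elif col_h[i + W - 1][j] >= W:
--                 score -= 100
--
--     # diagonals: diag window ends at (i + W - 1, j + W - 1), anti-diag at (i + W - 1, j)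
--     for i in range(min_row, max_row - W + 2):
--         for j in range(min_col, max_col - W + 2):
--             if dia_o[i + W - 1][j + W - 1] >= W:
--                 score += 100
--             elif dia_h[i + W - 1][j + W - 1] >= W:
--                 score -= 100
--             if ant_o[i + W - 1][j] >= W:
--                 score += 100
--             elif ant_h[i + W - 1][j] >= W:
--                 score -= 100
--
--     return score
-- ===== Notes on version B (the rewrite author's own statement) =====
-- stated objective: alternative
-- what changed: A recounts every W-cell window from scratch (line.count) for rows, columns and both diagonals; B precomputes eight run-length DP tables (one per direction and player) in one pass over the board and decides every window by a single table lookup at its end cell (it trades A's per-window recount for table precomputation over the whole board).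
-- outside the precondition, e.g. on evaluate([['O']], 0, 0, 0, 0, 1, 0): A returns 1200, B returns 0; on evaluate([['X']], 0, 0, 0, 1, 2, 2): A returns 0, B raises IndexError
import Mathlib
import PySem

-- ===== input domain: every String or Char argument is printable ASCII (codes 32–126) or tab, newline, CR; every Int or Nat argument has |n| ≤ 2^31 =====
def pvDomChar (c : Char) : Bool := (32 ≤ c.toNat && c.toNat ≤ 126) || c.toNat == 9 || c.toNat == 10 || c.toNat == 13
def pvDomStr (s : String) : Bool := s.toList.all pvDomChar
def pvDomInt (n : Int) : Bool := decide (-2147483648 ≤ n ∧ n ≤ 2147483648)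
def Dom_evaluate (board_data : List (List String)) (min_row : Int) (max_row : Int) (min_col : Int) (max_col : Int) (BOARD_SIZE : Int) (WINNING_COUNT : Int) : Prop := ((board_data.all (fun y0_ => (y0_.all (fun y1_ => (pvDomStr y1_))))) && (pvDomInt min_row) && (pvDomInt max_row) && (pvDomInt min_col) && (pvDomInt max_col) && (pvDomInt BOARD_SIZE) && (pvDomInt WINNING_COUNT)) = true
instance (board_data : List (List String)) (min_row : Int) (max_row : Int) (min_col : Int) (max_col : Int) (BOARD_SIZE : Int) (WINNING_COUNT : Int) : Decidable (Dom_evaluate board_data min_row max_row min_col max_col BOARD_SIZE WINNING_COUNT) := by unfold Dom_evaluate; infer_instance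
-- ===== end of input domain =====

-- B replaces A's per-window recounting by precomputed run-length tables (one per
-- direction and player): each window is decided by a table lookup at its end cell.

-- ===== PORT A =====
def pvGet (board_data : List (List String)) (i j : Int) : String :=
  PySem.List.pyGetD (PySem.List.pyGetD board_data i []) j ""

def evaluate_line (line : List String) (WINNING_COUNT : Int) : Int :=
  let count_ai := PySem.List.count line "O"
  let count_human := PySem.List.count line "X"
  if (count_ai : Int) = WINNING_COUNT then 100
  else if (count_human : Int) = WINNING_COUNT then -100
  else 0

def evaluate (board_data : List (List String)) (min_row : Int) (max_row : Int) (min_col : Int) (max_col : Int) (BOARD_SIZE : Int) (WINNING_COUNT : Int) : Int :=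
  let mr := max 0 min_row
  let Mr := min (BOARD_SIZE - 1) max_row
  let mc := max 0 min_col
  let Mc := min (BOARD_SIZE - 1) max_col
  let s1 := (PySem.List.pyRange mr (Mr + 1) 1).foldl (fun score i =>
    (PySem.List.pyRange mc (Mc - WINNING_COUNT + 2) 1).foldl (fun score j =>
      score + evaluate_line (PySem.List.slice (PySem.List.pyGetD board_data i []) (some j) (some (j + WINNING_COUNT))) WINNING_COUNT) score) 0
  let s2 := (PySem.List.pyRange mc (Mc + 1) 1).foldl (fun score j =>
    (PySem.List.pyRange mr (Mr - WINNING_COUNT + 2) 1).foldl (fun score i =>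
      score + evaluate_line ((PySem.List.pyRange 0 WINNING_COUNT 1).map (fun k => pvGet board_data (i + k) j)) WINNING_COUNT) score) s1
  (PySem.List.pyRange mr (Mr - WINNING_COUNT + 2) 1).foldl (fun score i =>
    (PySem.List.pyRange mc (Mc - WINNING_COUNT + 2) 1).foldl (fun score j =>
      score + evaluate_line ((PySem.List.pyRange 0 WINNING_COUNT 1).map (fun k => pvGet board_data (i + k) (j + k))) WINNING_COUNT
            + evaluate_line ((PySem.List.pyRange 0 WINNING_COUNT 1).map (fun k => pvGet board_data (i + k) (j + (WINNING_COUNT - 1 - k)))) WINNING_COUNT) score) s2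

-- ===== PORT B =====
def pvRunTable (board_data : List (List String)) (sym : String) (di dj : Int) : List (List Int) :=
  (PySem.List.pyRange 0 board_data.length 1).foldl (fun tab i =>
    let row := PySem.List.pyGetD board_data i []
    let cur := (PySem.List.pyRange 0 row.length 1).foldl (fun cur j =>
      let v : Int :=
        if PySem.List.pyGetD row j "" = sym then
          let pi := i - di
          let pj := j - dj
          let prow : Option (List Int) :=
            if pi = i then some cur
            else if 0 ≤ pi ∧ pi < (tab.length : Int) then some (PySem.List.pyGetD tab pi [])
            else none
          let prev : Int :=
            prow.elim 0 (fun p => if 0 ≤ pj ∧ pj < (p.length : Int) then PySem.List.pyGetD p pj 0 else 0)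
          prev + 1
        else 0
      cur ++ [v]) []
    tab ++ [cur]) []

def pvTGet (tab : List (List Int)) (i j : Int) : Int :=
  PySem.List.pyGetD (PySem.List.pyGetD tab i []) j 0

def evaluate_alt (board_data : List (List String)) (min_row : Int) (max_row : Int) (min_col : Int) (max_col : Int) (BOARD_SIZE : Int) (WINNING_COUNT : Int) : Int :=
  if WINNING_COUNT ≤ 0 then 0
  else
    let W := WINNING_COUNT
    let mr := max 0 min_row
    let Mr := min (BOARD_SIZE - 1) max_row
    let mc := max 0 min_col
    let Mc := min (BOARD_SIZE - 1) max_col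
    let row_o := pvRunTable board_data "O" 0 1
    let row_h := pvRunTable board_data "X" 0 1
    let col_o := pvRunTable board_data "O" 1 0
    let col_h := pvRunTable board_data "X" 1 0
    let dia_o := pvRunTable board_data "O" 1 1
    let dia_h := pvRunTable board_data "X" 1 1
    let ant_o := pvRunTable board_data "O" 1 (-1)
    let ant_h := pvRunTable board_data "X" 1 (-1)
    let s1 := (PySem.List.pyRange mr (Mr + 1) 1).foldl (fun score i =>
      (PySem.List.pyRange mc (Mc - W + 2) 1).foldl (fun score j =>
        if W ≤ pvTGet row_o i (j + W - 1) then score + 100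
        else if W ≤ pvTGet row_h i (j + W - 1) then score - 100
        else score) score) 0
    let s2 := (PySem.List.pyRange mc (Mc + 1) 1).foldl (fun score j =>
      (PySem.List.pyRange mr (Mr - W + 2) 1).foldl (fun score i =>
        if W ≤ pvTGet col_o (i + W - 1) j then score + 100
        else if W ≤ pvTGet col_h (i + W - 1) j then score - 100
        else score) score) s1
    (PySem.List.pyRange mr (Mr - W + 2) 1).foldl (fun score i =>
      (PySem.List.pyRange mc (Mc - W + 2) 1).foldl (fun score j =>
        let score :=
          if W ≤ pvTGet dia_o (i + W - 1) (j + W - 1) then score + 100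
          else if W ≤ pvTGet dia_h (i + W - 1) (j + W - 1) then score - 100
          else score
        if W ≤ pvTGet ant_o (i + W - 1) j then score + 100
        else if W ≤ pvTGet ant_h (i + W - 1) j then score - 100
        else score) score) s2

-- ===== PRECONDITION & SPEC =====
-- Pre_ excludes (a) inputs where A raises IndexError (a board whose accessed region is
-- missing rows or columns), (b) boards whose accessed rows are shorter than the column
-- range (there A's row slices are silently truncated while B's table lookup raises
-- IndexError), and (c) WINNING_COUNT = 0, a degenerate window length on which A's
-- +100-for-every-empty-window and B's 0 are both defensible and nobody would specify either.
def Pre_evaluate (board_data : List (List String)) (min_row : Int) (max_row : Int) (min_col : Int) (max_col : Int) (BOARD_SIZE : Int) (WINNING_COUNT : Int) : Prop :=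
  WINNING_COUNT ≠ 0 ∧
  (((max 0 min_row ≤ min (BOARD_SIZE - 1) max_row ∧
     max 0 min_col ≤ min (BOARD_SIZE - 1) max_col - WINNING_COUNT + 1) ∨
    (1 ≤ WINNING_COUNT ∧ max 0 min_col ≤ min (BOARD_SIZE - 1) max_col ∧
     max 0 min_row ≤ min (BOARD_SIZE - 1) max_row - WINNING_COUNT + 1)) →
   (min (BOARD_SIZE - 1) max_row < (board_data.length : Int) ∧
    ∀ i ∈ List.range board_data.length,
      (max 0 min_row ≤ (i : Int) ∧ (i : Int) ≤ min (BOARD_SIZE - 1) max_row) →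
      min (BOARD_SIZE - 1) max_col < ((board_data.getD i []).length : Int)))
instance (board_data : List (List String)) (min_row : Int) (max_row : Int) (min_col : Int) (max_col : Int) (BOARD_SIZE : Int) (WINNING_COUNT : Int) : Decidable (Pre_evaluate board_data min_row max_row min_col max_col BOARD_SIZE WINNING_COUNT) := by unfold Pre_evaluate; infer_instance

def pvWitness_evaluate : List (List String) × Int × Int × Int × Int × Int × Int :=
  ([["O", "O"], ["O", "X"]], 0, 1, 0, 1, 2, 2)

def Spec_evaluate (board_data : List (List String)) (min_row : Int) (max_row : Int) (min_col : Int) (max_col : Int) (BOARD_SIZE : Int) (WINNING_COUNT : Int) (out : Int) : Prop := out = evaluate_alt board_data min_row max_row min_col max_col BOARD_SIZE WINNING_COUNT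
instance (board_data : List (List String)) (min_row : Int) (max_row : Int) (min_col : Int) (max_col : Int) (BOARD_SIZE : Int) (WINNING_COUNT : Int) (out : Int) : Decidable (Spec_evaluate board_data min_row max_row min_col max_col BOARD_SIZE WINNING_COUNT out) := by unfold Spec_evaluate; infer_instance

-- ===== CLAIM (what is proved, stated in full; the proofs are below) =====
def Claim_equal_evaluate : Prop := ∀ (board_data : List (List String)) (min_row : Int) (max_row : Int) (min_col : Int) (max_col : Int) (BOARD_SIZE : Int) (WINNING_COUNT : Int), Dom_evaluate board_data min_row max_row min_col max_col BOARD_SIZE WINNING_COUNT → Pre_evaluate board_data min_row max_row min_col max_col BOARD_SIZE WINNING_COUNT → Spec_evaluate board_data min_row max_row min_col max_col BOARD_SIZE WINNING_COUNT (evaluate board_data min_row max_row min_col max_col BOARD_SIZE WINNING_COUNT)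

-- ===== LEMMAS AND PROOFS =====

-- mathematical run lengths: pvMRun b s d i j = number of consecutive cells equal to s
-- ending at (i, j), read backwards along direction d
inductive PvDir | row | col | dia | ant
deriving DecidableEq, Repr

def pvDi : PvDir → Int
  | .row => 0
  | _ => 1

def pvDj : PvDir → Int
  | .row => 1
  | .col => 0
  | .dia => 1
  | .ant => -1

def pvMRun (b : List (List String)) (s : String) (d : PvDir) (i j : Int) : Int :=
  if i < 0 ∨ j < 0 then 0
  else if pvGet b i j = s then pvMRun b s d (i - pvDi d) (j - pvDj d) + 1
  else 0
termination_by (2 * i + j + 1).toNat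
decreasing_by cases d <;> simp [pvDi, pvDj] <;> omega

lemma pvMRun_neg (b s d) {i j : Int} (h : i < 0 ∨ j < 0) : pvMRun b s d i j = 0 := by
  rw [pvMRun, if_pos h]

lemma pvMRun_pos (b s d) {i j : Int} (hi : 0 ≤ i) (hj : 0 ≤ j) :
    pvMRun b s d i j = if pvGet b i j = s then pvMRun b s d (i - pvDi d) (j - pvDj d) + 1 else 0 := by
  rw [pvMRun, if_neg (by omega)]

lemma pvMRun_nonneg (b s d) (i j : Int) : 0 ≤ pvMRun b s d i j := by
  induction i, j using pvMRun.induct b s d with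
  | case1 i j h => rw [pvMRun_neg b s d h]
  | case2 i j h hget ih => rw [pvMRun, if_neg h, if_pos hget]; omega
  | case3 i j h hget => simp [pvMRun, hget]

lemma evaluate_line_neg (line : List String) (W : Int) (hW : W < 0) :
    evaluate_line line W = 0 := by
  unfold evaluate_line
  rw [if_neg (by omega), if_neg (by omega)]

lemma pvCount_map_pyRange_iff (f : Int → String) (s : String) (W : Int) (hW : 0 ≤ W) :
    ((PySem.List.count ((PySem.List.pyRange 0 W 1).map f) s : Int) = W) ↔
      ∀ k : Int, 0 ≤ k → k < W → f k = s := by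
  have hlen : ((PySem.List.pyRange 0 W 1).map f).length = W.toNat := by
    simp [PySem.List.length_pyRange_one]
  rw [PySem.List.count_eq]
  constructor
  · intro h k hk0 hkW
    have hcl : List.count s ((PySem.List.pyRange 0 W 1).map f) = ((PySem.List.pyRange 0 W 1).map f).length := by omega
    have hall := List.count_eq_length.1 hcl
    have : f k ∈ (PySem.List.pyRange 0 W 1).map f :=
      List.mem_map_of_mem (by rw [PySem.List.mem_pyRange_one]; omega)
    exact (hall _ this).symm
  · intro h
    have : List.count s ((PySem.List.pyRange 0 W 1).map f) = ((PySem.List.pyRange 0 W 1).map f).length := by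
      rw [List.count_eq_length]
      intro x hx
      obtain ⟨k, hk, rfl⟩ := List.mem_map.1 hx
      rw [PySem.List.mem_pyRange_one] at hk
      exact (h k hk.1 hk.2).symm
    omega
lemma pvMRun_ge_iff (b s d) : ∀ (W : Nat) (i j : Int),
    ((W : Int) ≤ pvMRun b s d i j ↔
      ∀ k : Int, 0 ≤ k → k < (W : Int) →
        0 ≤ i - k * pvDi d ∧ 0 ≤ j - k * pvDj d ∧ pvGet b (i - k * pvDi d) (j - k * pvDj d) = s) := by
  intro W
  induction W with
  | zero => intro i j; simp [pvMRun_nonneg]; intro k h1 h2; omega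
  | succ W ih =>
    intro i j
    by_cases hneg : i < 0 ∨ j < 0
    · rw [pvMRun_neg b s d hneg]
      constructor
      · intro h; exfalso; push_cast at h; omega
      · intro h
        have := h 0 le_rfl (by push_cast; omega)
        simp at this; omega
    · push Not at hneg
      rw [pvMRun_pos b s d hneg.1 hneg.2]
      by_cases hget : pvGet b i j = s
      · rw [if_pos hget]
        have hiff := ih (i - pvDi d) (j - pvDj d)
        constructor
        · intro h k hk0 hkW
          rcases eq_or_lt_of_le hk0 with heq | hlt
          · subst heq; simpa [hget] using And.intro hneg.1 hneg.2
          · have h' : (W : Int) ≤ pvMRun b s d (i - pvDi d) (j - pvDj d) := by push_cast at h ⊢; omega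
            have := hiff.1 h' (k - 1) (by omega) (by push_cast at hkW ⊢; omega)
            have e1 : i - pvDi d - (k - 1) * pvDi d = i - k * pvDi d := by ring
            have e2 : j - pvDj d - (k - 1) * pvDj d = j - k * pvDj d := by ring
            rw [e1, e2] at this
            exact this
        · intro h
          have h' : (W : Int) ≤ pvMRun b s d (i - pvDi d) (j - pvDj d) := by
            rw [hiff]
            intro k hk0 hkW
            have := h (k + 1) (by omega) (by push_cast; omega)
            have e1 : i - (k + 1) * pvDi d = i - pvDi d - k * pvDi d := by ring
            have e2 : j - (k + 1) * pvDj d = j - pvDj d - k * pvDj d := by ring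
            rw [e1, e2] at this
            exact this
          push_cast at h' ⊢; omega
      · rw [if_neg hget]
        constructor
        · intro h; exfalso; push_cast at h; omega
        · intro h
          have := h 0 le_rfl (by push_cast; omega)
          simp [hget] at this
lemma pvMRun_window (b s) (d : PvDir) (i0 j0 W : Int) (hW : 1 ≤ W)
    (hik : ∀ k : Int, 0 ≤ k → k < W → 0 ≤ i0 + k * pvDi d)
    (hjk : ∀ k : Int, 0 ≤ k → k < W → 0 ≤ j0 + k * pvDj d) :
    (W ≤ pvMRun b s d (i0 + (W - 1) * pvDi d) (j0 + (W - 1) * pvDj d)) ↔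
      (∀ k : Int, 0 ≤ k → k < W → pvGet b (i0 + k * pvDi d) (j0 + k * pvDj d) = s) := by
  have hiff := pvMRun_ge_iff b s d W.toNat (i0 + (W - 1) * pvDi d) (j0 + (W - 1) * pvDj d)
  rw [Int.toNat_of_nonneg (by omega : (0:Int) ≤ W)] at hiff
  rw [hiff]
  constructor
  · intro h k hk0 hkW
    have := h (W - 1 - k) (by omega) (by omega)
    have e1 : i0 + (W - 1) * pvDi d - (W - 1 - k) * pvDi d = i0 + k * pvDi d := by ring
    have e2 : j0 + (W - 1) * pvDj d - (W - 1 - k) * pvDj d = j0 + k * pvDj d := by ring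
    rw [e1, e2] at this
    exact this.2.2
  · intro h t ht0 htW
    have e1 : i0 + (W - 1) * pvDi d - t * pvDi d = i0 + (W - 1 - t) * pvDi d := by ring
    have e2 : j0 + (W - 1) * pvDj d - t * pvDj d = j0 + (W - 1 - t) * pvDj d := by ring
    rw [e1, e2]
    exact ⟨hik _ (by omega) (by omega), hjk _ (by omega) (by omega), h _ (by omega) (by omega)⟩

lemma pvTerm_eq (b : List (List String)) (d : PvDir) (i0 j0 W : Int) (hW : 1 ≤ W)
    (hik : ∀ k : Int, 0 ≤ k → k < W → 0 ≤ i0 + k * pvDi d)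
    (hjk : ∀ k : Int, 0 ≤ k → k < W → 0 ≤ j0 + k * pvDj d) :
    evaluate_line ((PySem.List.pyRange 0 W 1).map (fun k => pvGet b (i0 + k * pvDi d) (j0 + k * pvDj d))) W =
      (if W ≤ pvMRun b "O" d (i0 + (W - 1) * pvDi d) (j0 + (W - 1) * pvDj d) then 100
       else if W ≤ pvMRun b "X" d (i0 + (W - 1) * pvDi d) (j0 + (W - 1) * pvDj d) then -100
       else 0) := by
  unfold evaluate_line
  have hO := (pvCount_map_pyRange_iff (fun k => pvGet b (i0 + k * pvDi d) (j0 + k * pvDj d)) "O" W (by omega)).trans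
    (pvMRun_window b "O" d i0 j0 W hW hik hjk).symm
  have hX := (pvCount_map_pyRange_iff (fun k => pvGet b (i0 + k * pvDi d) (j0 + k * pvDj d)) "X" W (by omega)).trans
    (pvMRun_window b "X" d i0 j0 W hW hik hjk).symm
  rw [if_congr hO rfl (if_congr hX rfl rfl)]
lemma pvSlice_window (row : List String) (j W : Int) (hj : 0 ≤ j) (hW : 0 ≤ W)
    (hlen : j + W ≤ (row.length : Int)) :
    PySem.List.slice row (some j) (some (j + W)) =
      (PySem.List.pyRange 0 W 1).map (fun k => PySem.List.pyGetD row (j + k) "") := by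
  rw [PySem.List.slice_toNat row hj (by omega)]
  apply List.ext_getElem
  · simp [PySem.List.length_pyRange_one]; omega
  · intro n h1 h2
    have hn : n < W.toNat := by simp [PySem.List.length_pyRange_one] at h2; omega
    have hjn : (j + n).toNat < row.length := by omega
    simp only [List.getElem_take, List.getElem_drop, List.getElem_map]
    rw [PySem.List.getElem_pyRange_one]
    rw [PySem.List.pyGetD_eq_getElem row "" (by omega) (by omega)]
    congr 1
    omega
-- proof-side mirrors of B's fold steps
def pvCellV (b : List (List String)) (s : String) (di dj : Int) (tab : List (List Int)) (cur : List Int) (i j : Int) : Int :=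
  if PySem.List.pyGetD (PySem.List.pyGetD b i []) j "" = s then
    let pi := i - di
    let pj := j - dj
    let prow : Option (List Int) :=
      if pi = i then some cur
      else if 0 ≤ pi ∧ pi < (tab.length : Int) then some (PySem.List.pyGetD tab pi [])
      else none
    let prev : Int :=
      prow.elim 0 (fun p => if 0 ≤ pj ∧ pj < (p.length : Int) then PySem.List.pyGetD p pj 0 else 0)
    prev + 1
  else 0

def pvRowF (b : List (List String)) (s : String) (di dj : Int) (tab : List (List Int)) (i : Int) : List Int :=
  (PySem.List.pyRange 0 ((PySem.List.pyGetD b i []).length : Int) 1).foldl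
    (fun cur j => cur ++ [pvCellV b s di dj tab cur i j]) []

def pvStep (b : List (List String)) (s : String) (di dj : Int) (tab : List (List Int)) (i : Int) : List (List Int) :=
  tab ++ [pvRowF b s di dj tab i]

lemma pvRunTable_eq (b : List (List String)) (s : String) (di dj : Int) :
    pvRunTable b s di dj = (PySem.List.pyRange 0 (b.length : Int) 1).foldl (pvStep b s di dj) [] := rfl
-- table invariant: first m rows are correct
def pvTabOK (b : List (List String)) (s : String) (d : PvDir) (m : Nat) (tab : List (List Int)) : Prop :=
  tab.length = m ∧
  ∀ i : Nat, i < m →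
    (tab.getD i []).length = (b.getD i []).length ∧
    ∀ j : Nat, j < (b.getD i []).length → (tab.getD i []).getD j 0 = pvMRun b s d i j

lemma pvMRun_oob (b : List (List String)) (s : String) (hs : s ≠ "") (d : PvDir)
    {i j : Int} (hi : 0 ≤ i) (hj : 0 ≤ j)
    (hlen : ((PySem.List.pyGetD b i []).length : Int) ≤ j) : pvMRun b s d i j = 0 := by
  rw [pvMRun_pos b s d hi hj, if_neg]
  unfold pvGet
  rw [PySem.List.pyGetD_of_none _ _ _ (by
    rw [PySem.List.pyGet?_eq_none_iff]
    unfold PySem.Raise.InRange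
    omega)]
  exact fun h => hs h.symm

lemma pvCellV_eval (b : List (List String)) (s : String) (hs : s ≠ "") (d : PvDir)
    (tab : List (List Int)) (cur : List Int) (i t : Nat) (_hi : i < b.length)
    (htl : tab.length = i)
    (htab : ∀ i' : Nat, i' < i →
        (tab.getD i' []).length = (b.getD i' []).length ∧
        ∀ j : Nat, j < (b.getD i' []).length → (tab.getD i' []).getD j 0 = pvMRun b s d i' j)
    (_ht : t < (b.getD i []).length) (hcl : cur.length = t)
    (hcur : ∀ j : Nat, j < t → cur.getD j 0 = pvMRun b s d i j) :
    pvCellV b s (pvDi d) (pvDj d) tab cur (i : Int) (t : Int) = pvMRun b s d i t := by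
  have hget : pvGet b i t = PySem.List.pyGetD (PySem.List.pyGetD b (i:Int) []) (t:Int) "" := rfl
  unfold pvCellV
  by_cases hcell : PySem.List.pyGetD (PySem.List.pyGetD b (i:Int) []) (t:Int) "" = s
  · rw [if_pos hcell]
    rw [pvMRun_pos b s d (by omega) (by omega), if_pos (hget ▸ hcell)]
    -- prev = pvMRun b s d (i - di) (t - dj)
    cases d with
    | row =>
      simp only [pvDi, pvDj, sub_zero, if_true, Option.elim_some]
      by_cases h0 : (0:Int) ≤ (t:Int) - 1 ∧ (t:Int) - 1 < (cur.length : Int)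
      · rw [if_pos h0, PySem.List.pyGetD_of_nonneg cur 0 h0.1]
        have e : ((t:Int) - 1).toNat = t - 1 := by omega
        rw [e, hcur (t-1) (by omega), show ((t:Int) - 1) = ((t - 1 : Nat) : Int) by omega]
      · rw [if_neg h0]
        rw [pvMRun_neg b s PvDir.row (i := (i:Int)) (Or.inr (show (t:Int) - 1 < 0 by omega))]
    | col =>
      simp only [pvDi, pvDj, sub_zero]
      rw [if_neg (show ¬((i:Int) - 1 = (i:Int)) by omega)]
      by_cases hi0 : (0:Int) ≤ (i:Int) - 1 ∧ (i:Int) - 1 < (tab.length : Int)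
      · rw [if_pos hi0]
        have e : ((i:Int) - 1) = ((i - 1 : Nat) : Int) := by omega
        rw [e, PySem.List.pyGetD_natCast]
        simp only [Option.elim_some]
        obtain ⟨hlen', hval'⟩ := htab (i-1) (by omega)
        by_cases hj0 : (0:Int) ≤ (t:Int) ∧ (t:Int) < ((tab.getD (i-1) []).length : Int)
        · rw [if_pos hj0, PySem.List.pyGetD_of_nonneg _ 0 hj0.1]
          have e2 : ((t:Int)).toNat = t := by omega
          rw [e2, hval' t (by omega)]
        · rw [if_neg hj0]
          rw [pvMRun_oob b s hs PvDir.col (i := ((i - 1 : Nat) : Int)) (j := (t : Int)) (by omega) (by omega)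
                (by rw [PySem.List.pyGetD_natCast]; omega)]
      · rw [if_neg hi0]
        simp only [Option.elim_none]
        rw [pvMRun_neg b s PvDir.col (j := (t:Int)) (Or.inl (by omega))]
    | dia =>
      simp only [pvDi, pvDj]
      rw [if_neg (show ¬((i:Int) - 1 = (i:Int)) by omega)]
      by_cases hi0 : (0:Int) ≤ (i:Int) - 1 ∧ (i:Int) - 1 < (tab.length : Int)
      · rw [if_pos hi0]
        have e : ((i:Int) - 1) = ((i - 1 : Nat) : Int) := by omega
        rw [e, PySem.List.pyGetD_natCast]
        simp only [Option.elim_some]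
        obtain ⟨hlen', hval'⟩ := htab (i-1) (by omega)
        by_cases hj0 : (0:Int) ≤ (t:Int) - 1 ∧ (t:Int) - 1 < ((tab.getD (i-1) []).length : Int)
        · rw [if_pos hj0, PySem.List.pyGetD_of_nonneg _ 0 hj0.1]
          have e2 : ((t:Int) - 1).toNat = t - 1 := by omega
          rw [e2, hval' (t-1) (by omega), show ((t:Int) - 1) = ((t - 1 : Nat) : Int) by omega]
        · rw [if_neg hj0]
          by_cases ht0 : (t:Int) - 1 < 0
          · rw [pvMRun_neg b s PvDir.dia (i := ((i - 1 : Nat) : Int)) (Or.inr ht0)]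
          · rw [pvMRun_oob b s hs PvDir.dia (i := ((i - 1 : Nat) : Int)) (j := (t : Int) - 1) (by omega) (by omega)
                  (by rw [PySem.List.pyGetD_natCast]; omega)]
      · rw [if_neg hi0]
        simp only [Option.elim_none]
        rw [pvMRun_neg b s PvDir.dia (j := (t:Int) - 1) (Or.inl (by omega))]
    | ant =>
      simp only [pvDi, pvDj]
      rw [if_neg (show ¬((i:Int) - 1 = (i:Int)) by omega)]
      by_cases hi0 : (0:Int) ≤ (i:Int) - 1 ∧ (i:Int) - 1 < (tab.length : Int)
      · rw [if_pos hi0]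
        have e : ((i:Int) - 1) = ((i - 1 : Nat) : Int) := by omega
        rw [e, PySem.List.pyGetD_natCast]
        simp only [Option.elim_some]
        obtain ⟨hlen', hval'⟩ := htab (i-1) (by omega)
        by_cases hj0 : (0:Int) ≤ (t:Int) - (-1) ∧ (t:Int) - (-1) < ((tab.getD (i-1) []).length : Int)
        · rw [if_pos hj0, PySem.List.pyGetD_of_nonneg _ 0 hj0.1]
          have e2 : ((t:Int) - (-1)).toNat = t + 1 := by omega
          rw [e2, hval' (t+1) (by omega), show ((t:Int) - (-1)) = ((t + 1 : Nat) : Int) by omega]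
        · rw [if_neg hj0]
          rw [pvMRun_oob b s hs PvDir.ant (i := ((i - 1 : Nat) : Int)) (j := (t : Int) - (-1)) (by omega) (by omega)
                (by rw [PySem.List.pyGetD_natCast]; omega)]
      · rw [if_neg hi0]
        simp only [Option.elim_none]
        rw [pvMRun_neg b s PvDir.ant (j := (t:Int) - (-1)) (Or.inl (by omega))]
  · rw [if_neg hcell]
    rw [pvMRun_pos b s d (by omega) (by omega), if_neg (hget ▸ hcell)]
lemma pvRowAux_spec (b : List (List String)) (s : String) (hs : s ≠ "") (d : PvDir)
    (tab : List (List Int)) (i : Nat) (hi : i < b.length) (htl : tab.length = i)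
    (htab : ∀ i' : Nat, i' < i →
        (tab.getD i' []).length = (b.getD i' []).length ∧
        ∀ j : Nat, j < (b.getD i' []).length → (tab.getD i' []).getD j 0 = pvMRun b s d i' j) :
    ∀ t : Nat, t ≤ (b.getD i []).length →
      ((PySem.List.pyRange 0 (t : Int) 1).foldl
          (fun cur j => cur ++ [pvCellV b s (pvDi d) (pvDj d) tab cur (i : Int) j]) []).length = t ∧
      ∀ j : Nat, j < t →
        ((PySem.List.pyRange 0 (t : Int) 1).foldl
            (fun cur j => cur ++ [pvCellV b s (pvDi d) (pvDj d) tab cur (i : Int) j]) []).getD j 0 =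
          pvMRun b s d i j := by
  intro t
  induction t with
  | zero => intro _; simp [PySem.List.pyRange_one_eq_nil]
  | succ t ih =>
    intro hle
    obtain ⟨ihl, ihv⟩ := ih (by omega)
    have hsplit : PySem.List.pyRange 0 ((t + 1 : Nat) : Int) 1 =
        PySem.List.pyRange 0 (t : Int) 1 ++ [(t : Int)] := by
      push_cast
      exact PySem.List.pyRange_one_succ_right (by omega)
    rw [hsplit, List.foldl_append]
    set cur := (PySem.List.pyRange 0 (t : Int) 1).foldl
        (fun cur j => cur ++ [pvCellV b s (pvDi d) (pvDj d) tab cur (i : Int) j]) [] with hcur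
    simp only [List.foldl_cons, List.foldl_nil]
    have hv : pvCellV b s (pvDi d) (pvDj d) tab cur (i : Int) (t : Int) = pvMRun b s d i t :=
      pvCellV_eval b s hs d tab cur i t hi htl htab (by omega) ihl ihv
    constructor
    · simp [ihl]
    · intro j hj
      rcases Nat.lt_or_ge j t with hjt | hjt
      · rw [List.getD_append _ _ _ _ (by omega)]
        exact ihv j hjt
      · have hjt' : j = t := by omega
        subst hjt'
        rw [List.getD_append_right _ _ _ _ (by omega)]
        simp [ihl, hv]

lemma pvTab_spec (b : List (List String)) (s : String) (hs : s ≠ "") (d : PvDir) :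
    ∀ m : Nat, m ≤ b.length →
      pvTabOK b s d m ((PySem.List.pyRange 0 (m : Int) 1).foldl (pvStep b s (pvDi d) (pvDj d)) []) := by
  intro m
  induction m with
  | zero => intro _; exact ⟨by simp [PySem.List.pyRange_one_eq_nil], by omega⟩
  | succ m ih =>
    intro hle
    obtain ⟨ihl, ihv⟩ := ih (by omega)
    have hsplit : PySem.List.pyRange 0 ((m + 1 : Nat) : Int) 1 =
        PySem.List.pyRange 0 (m : Int) 1 ++ [(m : Int)] := by
      push_cast
      exact PySem.List.pyRange_one_succ_right (by omega)
    rw [hsplit, List.foldl_append]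
    set tab := (PySem.List.pyRange 0 (m : Int) 1).foldl (pvStep b s (pvDi d) (pvDj d)) [] with htab
    simp only [List.foldl_cons, List.foldl_nil]
    unfold pvStep pvRowF
    have hrowlen : ((PySem.List.pyGetD b (m : Int) []).length : Int) = ((b.getD m []).length : Int) := by
      rw [PySem.List.pyGetD_natCast]
    rw [hrowlen]
    have hrow := pvRowAux_spec b s hs d tab m (by omega) ihl ihv (b.getD m []).length le_rfl
    constructor
    · simp [ihl]
    · intro i' hi'
      rcases Nat.lt_or_ge i' m with him | him
      · rw [List.getD_append _ _ _ _ (by omega)]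
        exact ihv i' him
      · have : i' = m := by omega
        subst this
        rw [List.getD_append_right _ _ _ _ (by omega)]
        simp only [ihl, Nat.sub_self, List.getD]
        simpa using hrow

lemma pvRunTable_get (b : List (List String)) (s : String) (hs : s ≠ "") (d : PvDir)
    (i j : Nat) (hi : i < b.length) (hj : j < (b.getD i []).length) :
    pvTGet (pvRunTable b s (pvDi d) (pvDj d)) (i : Int) (j : Int) = pvMRun b s d i j := by
  obtain ⟨hl, hv⟩ := pvTab_spec b s hs d b.length le_rfl
  unfold pvTGet
  rw [pvRunTable_eq, PySem.List.pyGetD_natCast, PySem.List.pyGetD_natCast]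
  refine Eq.trans ?_ ((hv i hi).2 j hj)
  norm_num
lemma pvIfScore (score : Int) (c1 c2 : Prop) [Decidable c1] [Decidable c2] :
    (if c1 then score + 100 else if c2 then score - 100 else score) =
      score + (if c1 then (100 : Int) else if c2 then -100 else 0) := by
  split_ifs <;> ring

lemma pvRowTerm (b : List (List String)) (W i j : Int) (hW : 1 ≤ W) (hi : 0 ≤ i) (hj : 0 ≤ j)
    (hilen : i < (b.length : Int)) (hjlen : j + W ≤ ((b.getD i.toNat []).length : Int)) :
    evaluate_line (PySem.List.slice (PySem.List.pyGetD b i []) (some j) (some (j + W))) W =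
      (if W ≤ pvTGet (pvRunTable b "O" 0 1) i (j + W - 1) then 100
       else if W ≤ pvTGet (pvRunTable b "X" 0 1) i (j + W - 1) then -100 else 0) := by
  have hrow : PySem.List.pyGetD b i [] = b.getD i.toNat [] := PySem.List.pyGetD_of_nonneg b [] hi
  rw [pvSlice_window (PySem.List.pyGetD b i []) j W hj (by omega) (by rw [hrow]; exact_mod_cast hjlen)]
  have ht := pvTerm_eq b .row i j W hW (by intro k h1 h2; simp [pvDi]; omega)
    (by intro k h1 h2; simp [pvDj]; omega)
  simp only [pvDi, pvDj, mul_zero, add_zero, mul_one, pvGet] at ht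
  rw [ht]
  have hO := pvRunTable_get b "O" (by decide) .row i.toNat (j + W - 1).toNat (by omega) (by omega)
  have hX := pvRunTable_get b "X" (by decide) .row i.toNat (j + W - 1).toNat (by omega) (by omega)
  simp only [pvDi, pvDj] at hO hX
  rw [Int.toNat_of_nonneg hi, Int.toNat_of_nonneg (by omega : (0:Int) ≤ j + W - 1)] at hO hX
  rw [show j + (W - 1) = j + W - 1 by ring, hO, hX]

lemma pvColTerm (b : List (List String)) (W i j : Int) (hW : 1 ≤ W) (hi : 0 ≤ i) (hj : 0 ≤ j)
    (hilen : i + W ≤ (b.length : Int)) (hjlen : j < ((b.getD (i + W - 1).toNat []).length : Int)) :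
    evaluate_line ((PySem.List.pyRange 0 W 1).map (fun k => pvGet b (i + k) j)) W =
      (if W ≤ pvTGet (pvRunTable b "O" 1 0) (i + W - 1) j then 100
       else if W ≤ pvTGet (pvRunTable b "X" 1 0) (i + W - 1) j then -100 else 0) := by
  have ht := pvTerm_eq b .col i j W hW (by intro k h1 h2; simp [pvDi]; omega)
    (by intro k h1 h2; simp [pvDj]; omega)
  simp only [pvDi, pvDj, mul_zero, add_zero, mul_one] at ht
  rw [ht]
  have hO := pvRunTable_get b "O" (by decide) .col (i + W - 1).toNat j.toNat (by omega) (by omega)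
  have hX := pvRunTable_get b "X" (by decide) .col (i + W - 1).toNat j.toNat (by omega) (by omega)
  simp only [pvDi, pvDj] at hO hX
  rw [Int.toNat_of_nonneg (by omega : (0:Int) ≤ i + W - 1), Int.toNat_of_nonneg hj] at hO hX
  rw [show i + (W - 1) = i + W - 1 by ring, hO, hX]

lemma pvDiaTerm (b : List (List String)) (W i j : Int) (hW : 1 ≤ W) (hi : 0 ≤ i) (hj : 0 ≤ j)
    (hilen : i + W ≤ (b.length : Int)) (hjlen : j + W ≤ ((b.getD (i + W - 1).toNat []).length : Int)) :
    evaluate_line ((PySem.List.pyRange 0 W 1).map (fun k => pvGet b (i + k) (j + k))) W =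
      (if W ≤ pvTGet (pvRunTable b "O" 1 1) (i + W - 1) (j + W - 1) then 100
       else if W ≤ pvTGet (pvRunTable b "X" 1 1) (i + W - 1) (j + W - 1) then -100 else 0) := by
  have ht := pvTerm_eq b .dia i j W hW (by intro k h1 h2; simp [pvDi]; omega)
    (by intro k h1 h2; simp [pvDj]; omega)
  simp only [pvDi, pvDj, mul_one] at ht
  rw [ht]
  have hO := pvRunTable_get b "O" (by decide) .dia (i + W - 1).toNat (j + W - 1).toNat (by omega) (by omega)
  have hX := pvRunTable_get b "X" (by decide) .dia (i + W - 1).toNat (j + W - 1).toNat (by omega) (by omega)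
  simp only [pvDi, pvDj] at hO hX
  rw [Int.toNat_of_nonneg (by omega : (0:Int) ≤ i + W - 1),
      Int.toNat_of_nonneg (by omega : (0:Int) ≤ j + W - 1)] at hO hX
  rw [show i + (W - 1) = i + W - 1 by ring, show j + (W - 1) = j + W - 1 by ring, hO, hX]

lemma pvAntTerm (b : List (List String)) (W i j : Int) (hW : 1 ≤ W) (hi : 0 ≤ i) (hj : 0 ≤ j)
    (hilen : i + W ≤ (b.length : Int)) (hjlen : j < ((b.getD (i + W - 1).toNat []).length : Int)) :
    evaluate_line ((PySem.List.pyRange 0 W 1).map (fun k => pvGet b (i + k) (j + (W - 1 - k)))) W =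
      (if W ≤ pvTGet (pvRunTable b "O" 1 (-1)) (i + W - 1) j then 100
       else if W ≤ pvTGet (pvRunTable b "X" 1 (-1)) (i + W - 1) j then -100 else 0) := by
  have hfun : (fun k : Int => pvGet b (i + k) (j + (W - 1 - k))) =
      (fun k : Int => pvGet b (i + k * 1) (j + W - 1 + k * (-1))) := by
    funext k
    rw [show i + k = i + k * 1 by ring, show j + (W - 1 - k) = j + W - 1 + k * (-1) by ring]
  rw [hfun]
  have ht := pvTerm_eq b .ant i (j + W - 1) W hW (by intro k h1 h2; simp [pvDi]; omega)
    (by intro k h1 h2; simp [pvDj]; omega)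
  simp only [pvDi, pvDj] at ht
  rw [ht]
  have hO := pvRunTable_get b "O" (by decide) .ant (i + W - 1).toNat j.toNat (by omega) (by omega)
  have hX := pvRunTable_get b "X" (by decide) .ant (i + W - 1).toNat j.toNat (by omega) (by omega)
  simp only [pvDi, pvDj] at hO hX
  rw [Int.toNat_of_nonneg (by omega : (0:Int) ≤ i + W - 1), Int.toNat_of_nonneg hj] at hO hX
  have e1 : i + (W - 1) * 1 = i + W - 1 := by ring
  have e2 : j + W - 1 + (W - 1) * (-1) = j := by ring
  simp only [e1, e2, hO, hX]
-- ===== VERDICT (by name: the statement is the Claim_ definition above) =====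
theorem evaluate_spec : Claim_equal_evaluate := by
  intro b mnr mxr mnc mxc BS W _hDom hPre
  obtain ⟨hW0, hacc⟩ := hPre
  unfold Spec_evaluate
  simp only [evaluate, evaluate_alt]
  have collapse : ∀ {l : List Int} {f : Int → Int → Int} (init : Int),
      (∀ acc x, x ∈ l → f acc x = acc) → l.foldl f init = init := by
    intro l f init h
    rw [PySem.List.foldl_congr_mem l f (fun acc _ => acc) init h]
    exact List.foldl_fixed l
  rcases lt_or_gt_of_ne hW0 with hWn | hWp
  · -- W < 0 : every window term of A is 0, and B returns 0 by its guard
    rw [if_pos (by omega : W ≤ 0)]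
    refine Eq.trans (collapse _ ?_) (Eq.trans (collapse _ ?_) (collapse _ ?_))
    · intro acc i _
      refine collapse acc ?_
      intro acc' j _
      rw [evaluate_line_neg _ _ hWn, evaluate_line_neg _ _ hWn]
      ring
    · intro acc j _
      refine collapse acc ?_
      intro acc' i _
      rw [evaluate_line_neg _ _ hWn]
      ring
    · intro acc i _
      refine collapse acc ?_
      intro acc' j _
      rw [evaluate_line_neg _ _ hWn]
      ring
  · -- 1 ≤ W
    rw [if_neg (by omega : ¬ W ≤ 0)]
    have hW1 : 1 ≤ W := hWp
    -- nest 1: rows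
    have e1 : (PySem.List.pyRange (max 0 mnr) (min (BS - 1) mxr + 1) 1).foldl (fun score i =>
        (PySem.List.pyRange (max 0 mnc) (min (BS - 1) mxc - W + 2) 1).foldl (fun score j =>
          score + evaluate_line (PySem.List.slice (PySem.List.pyGetD b i []) (some j) (some (j + W))) W) score) 0 =
        (PySem.List.pyRange (max 0 mnr) (min (BS - 1) mxr + 1) 1).foldl (fun score i =>
        (PySem.List.pyRange (max 0 mnc) (min (BS - 1) mxc - W + 2) 1).foldl (fun score j =>
          if W ≤ pvTGet (pvRunTable b "O" 0 1) i (j + W - 1) then score + 100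
          else if W ≤ pvTGet (pvRunTable b "X" 0 1) i (j + W - 1) then score - 100
          else score) score) 0 := by
      apply PySem.List.foldl_congr_mem
      intro acc i hi
      apply PySem.List.foldl_congr_mem
      intro acc' j hj
      rw [PySem.List.mem_pyRange_one] at hi hj
      have hd := hacc (Or.inl ⟨by omega, by omega⟩)
      have hrow := hd.2 i.toNat (List.mem_range.2 (by omega)) ⟨by omega, by omega⟩
      rw [pvIfScore, pvRowTerm b W i j hW1 (by omega) (by omega) (by omega) (by omega)]
    -- nest 2: columns
    have e2 : ∀ init : Int, (PySem.List.pyRange (max 0 mnc) (min (BS - 1) mxc + 1) 1).foldl (fun score j =>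
        (PySem.List.pyRange (max 0 mnr) (min (BS - 1) mxr - W + 2) 1).foldl (fun score i =>
          score + evaluate_line ((PySem.List.pyRange 0 W 1).map (fun k => pvGet b (i + k) j)) W) score) init =
        (PySem.List.pyRange (max 0 mnc) (min (BS - 1) mxc + 1) 1).foldl (fun score j =>
        (PySem.List.pyRange (max 0 mnr) (min (BS - 1) mxr - W + 2) 1).foldl (fun score i =>
          if W ≤ pvTGet (pvRunTable b "O" 1 0) (i + W - 1) j then score + 100
          else if W ≤ pvTGet (pvRunTable b "X" 1 0) (i + W - 1) j then score - 100
          else score) score) init := by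
      intro init
      apply PySem.List.foldl_congr_mem
      intro acc j hj
      apply PySem.List.foldl_congr_mem
      intro acc' i hi
      rw [PySem.List.mem_pyRange_one] at hi hj
      have hd := hacc (Or.inr ⟨hW1, by omega, by omega⟩)
      have hrow := hd.2 (i + W - 1).toNat (List.mem_range.2 (by omega)) ⟨by omega, by omega⟩
      rw [pvIfScore, pvColTerm b W i j hW1 (by omega) (by omega) (by omega) (by omega)]
    -- nest 3: diagonals
    have e3 : ∀ init : Int, (PySem.List.pyRange (max 0 mnr) (min (BS - 1) mxr - W + 2) 1).foldl (fun score i =>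
        (PySem.List.pyRange (max 0 mnc) (min (BS - 1) mxc - W + 2) 1).foldl (fun score j =>
          score + evaluate_line ((PySem.List.pyRange 0 W 1).map (fun k => pvGet b (i + k) (j + k))) W
                + evaluate_line ((PySem.List.pyRange 0 W 1).map (fun k => pvGet b (i + k) (j + (W - 1 - k)))) W) score) init =
        (PySem.List.pyRange (max 0 mnr) (min (BS - 1) mxr - W + 2) 1).foldl (fun score i =>
        (PySem.List.pyRange (max 0 mnc) (min (BS - 1) mxc - W + 2) 1).foldl (fun score j =>
          if W ≤ pvTGet (pvRunTable b "O" 1 (-1)) (i + W - 1) j then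
            (if W ≤ pvTGet (pvRunTable b "O" 1 1) (i + W - 1) (j + W - 1) then score + 100
             else if W ≤ pvTGet (pvRunTable b "X" 1 1) (i + W - 1) (j + W - 1) then score - 100
             else score) + 100
          else if W ≤ pvTGet (pvRunTable b "X" 1 (-1)) (i + W - 1) j then
            (if W ≤ pvTGet (pvRunTable b "O" 1 1) (i + W - 1) (j + W - 1) then score + 100
             else if W ≤ pvTGet (pvRunTable b "X" 1 1) (i + W - 1) (j + W - 1) then score - 100
             else score) - 100
          else
            (if W ≤ pvTGet (pvRunTable b "O" 1 1) (i + W - 1) (j + W - 1) then score + 100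
             else if W ≤ pvTGet (pvRunTable b "X" 1 1) (i + W - 1) (j + W - 1) then score - 100
             else score)) score) init := by
      intro init
      apply PySem.List.foldl_congr_mem
      intro acc i hi
      apply PySem.List.foldl_congr_mem
      intro acc' j hj
      rw [PySem.List.mem_pyRange_one] at hi hj
      have hd := hacc (Or.inr ⟨hW1, by omega, by omega⟩)
      have hrow := hd.2 (i + W - 1).toNat (List.mem_range.2 (by omega)) ⟨by omega, by omega⟩
      rw [pvIfScore, pvIfScore, pvDiaTerm b W i j hW1 (by omega) (by omega) (by omega) (by omega),
          pvAntTerm b W i j hW1 (by omega) (by omega) (by omega) (by omega)]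
    rw [e1, e2, e3]
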